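-- pv_equiv track=rewrite | github.com/hyuzenn/OpenYOLO3D | method_scannet/streaming/metrics.py | time_to_confirm
-- ===== SOURCE A (Python) =====
-- from collections import defaultdict
-- from typing import Any, Mapping, Optional, Sequence
--
-- def time_to_confirm(
--     pred_history: Sequence[Mapping[int, Any]],
--     K: int = 3,
-- ) -> dict[int, int]:
--     """C1 with default K=3: K consecutive frames with the same class.
--
--     For each prediction instance ``k``:
--         first_seen[k]    = first t with pred_class[k, t] != -1
--         confirmed_at[k]  = first t s.t. pred_history[t-K+1..t] all carry
--                            the same class for k (and that class != -1)
--         time_to_confirm  = confirmed_at[k] - first_seen[k]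
--
--     Returns:
--         {pred_instance_id: frames_to_confirm}. Instances that never
--         reach K-consecutive stability are omitted from the result.
--     """
--     first_seen: dict[int, int] = {}
--     confirmed_at: dict[int, int] = {}
--     class_history: dict[int, list[Any]] = defaultdict(list)
--
--     for t, frame_map in enumerate(pred_history):
--         for pred_id, label in frame_map.items():
--             if label == -1:
--                 continue
--             if pred_id not in first_seen:
--                 first_seen[pred_id] = t
--             class_history[pred_id].append(label)
--             recent = class_history[pred_id][-K:]
--             if (
--                 pred_id not in confirmed_at
--                 and len(recent) == K
--                 and all(c == recent[0] for c in recent)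
--             ):
--                 confirmed_at[pred_id] = t
--
--     return {
--         pred_id: confirmed_at[pred_id] - first_seen[pred_id]
--         for pred_id in confirmed_at
--     }
-- ===== SOURCE B (Python) =====
-- def time_to_confirm(pred_history, K=3):
--     """One pass with an incremental run-length counter per instance:
--     no per-frame slicing/rescanning of the last K labels."""
--     first_seen = {}
--     run = {}      # pred_id -> (last label, current consecutive count)
--     result = {}   # pred_id -> frames to confirm, in confirmation order
--     for t, frame_map in enumerate(pred_history):
--         for pred_id, label in frame_map.items():
--             if label == -1:
--                 continue
--             if pred_id not in first_seen:
--                 first_seen[pred_id] = t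
--             prev = run.get(pred_id)
--             cnt = prev[1] + 1 if prev is not None and prev[0] == label else 1
--             run[pred_id] = (label, cnt)
--             if cnt == K and pred_id not in result:
--                 result[pred_id] = t - first_seen[pred_id]
--     return result
-- ===== Notes on version B (the rewrite author's own statement) =====
-- stated objective: faster
-- what changed: replaces per-frame slicing of the last K labels and rescanning them (all(c == recent[0] ...)) by an incremental per-instance run-length counter, confirming when the counter reaches K
import Mathlib
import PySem

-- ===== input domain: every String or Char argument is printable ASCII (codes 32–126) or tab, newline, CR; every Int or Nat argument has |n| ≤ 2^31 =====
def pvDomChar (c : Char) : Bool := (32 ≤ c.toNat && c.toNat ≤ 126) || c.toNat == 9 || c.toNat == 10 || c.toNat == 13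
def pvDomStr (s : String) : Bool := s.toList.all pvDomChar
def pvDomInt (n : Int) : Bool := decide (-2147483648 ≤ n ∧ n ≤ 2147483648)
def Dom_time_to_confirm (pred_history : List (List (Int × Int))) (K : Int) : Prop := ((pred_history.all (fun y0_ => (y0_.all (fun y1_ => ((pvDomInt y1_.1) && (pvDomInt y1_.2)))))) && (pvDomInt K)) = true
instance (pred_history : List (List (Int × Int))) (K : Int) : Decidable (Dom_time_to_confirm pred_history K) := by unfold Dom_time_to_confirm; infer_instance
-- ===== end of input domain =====

-- B replaces A's per-frame slice of the last K labels and its rescan by an incremental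
-- per-instance run-length counter (one pass, no slicing); return values are proved equal.

-- ===== PORT A =====
-- body of A's inner loop over frame_map.items(); state = (first_seen, confirmed_at, class_history)
def ttcStepA (K : Int) (t : Int)
    (st : PySem.Dict Int Int × PySem.Dict Int Int × PySem.Dict Int (List Int))
    (pr : Int × Int) :
    PySem.Dict Int Int × PySem.Dict Int Int × PySem.Dict Int (List Int) :=
  let fs := st.1
  let ca := st.2.1
  let ch := st.2.2
  if pr.2 = -1 then st
  else
    let fs := if fs.contains pr.1 then fs else fs.insert pr.1 t
    let ch := ch.modify pr.1 [] (fun l => l ++ [pr.2])      -- defaultdict(list) append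
    let recent := PySem.List.slice (ch.getD pr.1 []) (some (-K)) none   -- class_history[pred_id][-K:]
    -- Python evaluates recent[0] only when recent is nonempty (len(recent)==K holds first)
    let ca := if ¬ ca.contains pr.1 = true ∧ (recent.length : Int) = K ∧
        (∀ c ∈ recent, c = PySem.List.pyGetD recent 0 0)
      then ca.insert pr.1 t else ca
    (fs, ca, ch)

def time_to_confirm (pred_history : List (List (Int × Int))) (K : Int) : List (Int × Int) :=
  let st := (PySem.List.enumerate pred_history 0).foldl
    (fun st tf => tf.2.foldl (ttcStepA K tf.1) st)
    (PySem.Dict.empty, PySem.Dict.empty, PySem.Dict.empty)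
  -- final comprehension; both keys are present for every confirmed id, so the lookups are getD _ _ 0
  st.2.1.keys.map (fun p => (p, st.2.1.getD p 0 - st.1.getD p 0))

-- ===== PORT B =====
-- body of B's inner loop; state = (first_seen, run, result), run maps pred_id to (last label, count)
def ttcStepB (K : Int) (t : Int)
    (st : PySem.Dict Int Int × PySem.Dict Int (Int × Int) × PySem.Dict Int Int)
    (pr : Int × Int) :
    PySem.Dict Int Int × PySem.Dict Int (Int × Int) × PySem.Dict Int Int :=
  let fs := st.1
  let run := st.2.1
  let res := st.2.2
  if pr.2 = -1 then st
  else
    let fs := if fs.contains pr.1 then fs else fs.insert pr.1 t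
    let cnt : Int := match run.get? pr.1 with
      | some lc => if lc.1 = pr.2 then lc.2 + 1 else 1
      | none => 1
    let run := run.insert pr.1 (pr.2, cnt)
    let res := if cnt = K ∧ ¬ res.contains pr.1 = true
      then res.insert pr.1 (t - fs.getD pr.1 0) else res
    (fs, run, res)

def time_to_confirm_alt (pred_history : List (List (Int × Int))) (K : Int) : List (Int × Int) :=
  ((PySem.List.enumerate pred_history 0).foldl
    (fun st tf => tf.2.foldl (ttcStepB K tf.1) st)
    (PySem.Dict.empty, PySem.Dict.empty, PySem.Dict.empty)).2.2.items

-- ===== PRECONDITION & SPEC =====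
def Spec_time_to_confirm (pred_history : List (List (Int × Int))) (K : Int) (out : List (Int × Int)) : Prop := out = time_to_confirm_alt pred_history K
instance (pred_history : List (List (Int × Int))) (K : Int) (out : List (Int × Int)) : Decidable (Spec_time_to_confirm pred_history K out) := by unfold Spec_time_to_confirm; infer_instance

-- ===== CLAIM (what is proved, stated in full; the proofs are below) =====
def Claim_equal_time_to_confirm : Prop := ∀ (pred_history : List (List (Int × Int))) (K : Int), Dom_time_to_confirm pred_history K → Spec_time_to_confirm pred_history K (time_to_confirm pred_history K)

-- ===== LEMMAS AND PROOFS =====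

def runStep (o : Option (Int × Int)) (x : Int) : Option (Int × Int) :=
  match o with
  | some lc => if lc.1 = x then some (x, lc.2 + 1) else some (x, 1)
  | none => some (x, 1)

def runF (h : List Int) : Option (Int × Int) := h.foldl runStep none

theorem runF_append (h : List Int) (x : Int) : runF (h ++ [x]) = runStep (runF h) x := by
  simp [runF, List.foldl_append]

def RunOK (h : List Int) : Prop :=
  match runF h with
  | none => h = []
  | some lc => ∃ n : Nat, lc.2 = (n : Int) ∧ 1 ≤ n ∧ n ≤ h.length ∧
      h.drop (h.length - n) = List.replicate n lc.1 ∧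
      (n = h.length ∨ h.getD (h.length - n - 1) 0 ≠ lc.1)

theorem runOK (h : List Int) : RunOK h := by
  induction h using List.reverseRecOn with
  | nil => simp [RunOK, runF]
  | append_singleton h x ih =>
    unfold RunOK
    rw [runF_append]
    cases hr : runF h with
    | none =>
      have hnil : h = [] := by unfold RunOK at ih; rw [hr] at ih; exact ih
      subst hnil
      refine ⟨1, by simp, by simp, by simp, by simp, Or.inl (by simp)⟩
    | some lc =>
      have ih' := ih
      unfold RunOK at ih'
      rw [hr] at ih'
      obtain ⟨n, hc, h1, hlen, hdrop, hbd⟩ := ih'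
      by_cases hlx : lc.1 = x
      · rw [show runStep (some lc) x = some (x, lc.2 + 1) by simp [runStep, hlx]]
        refine ⟨n + 1, ?_, by omega, by simp; omega, ?_, ?_⟩
        · simp [hc]
        · have hle : h.length + 1 - (n + 1) = h.length - n := by omega
          rw [List.length_append, List.length_singleton, hle,
            List.drop_append_of_le_length (by omega), hdrop, hlx]
          simp [List.replicate_succ']
        · rcases hbd with hb | hb
          · exact Or.inl (by simp [hb])
          · refine Or.inr ?_
            have hidx : h.length + 1 - (n + 1) - 1 = h.length - n - 1 := by omega
            simp only [List.length_append, List.length_singleton, hidx]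
            rw [List.getD_append _ _ _ _ (by omega)]
            rw [hlx] at hb
            simpa using hb
      · rw [show runStep (some lc) x = some (x, 1) by simp [runStep, hlx]]
        refine ⟨1, by simp, le_refl 1, by simp, ?_, ?_⟩
        · simp only [List.length_append, List.length_singleton]
          have : h.length + 1 - 1 = h.length := by omega
          rw [this, List.drop_append_of_le_length (by omega)]
          simp
        · refine Or.inr ?_
          simp only [List.length_append, List.length_singleton]
          have hi : h.length + 1 - 1 - 1 = h.length - 1 := by omega
          rw [hi, List.getD_append _ _ _ _ (by omega)]
          have hlast : h.getD (h.length - 1) 0 = lc.1 := by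
            have hj : (h.length - n) + (n - 1) = h.length - 1 := by omega
            have hg := List.getElem?_drop (xs := h) (i := h.length - n) (j := n - 1)
            rw [hdrop, hj, List.getElem?_replicate] at hg
            rw [List.getD_eq_getElem?_getD, ← hg]
            simp [show n - 1 < n by omega]
          rw [hlast]
          exact hlx

theorem sliceCond_iff (h : List Int) (lab K : Int) (n : Nat)
    (h1 : 1 ≤ n) (hlen : n ≤ h.length)
    (hdrop : h.drop (h.length - n) = List.replicate n lab)
    (hbd : n = h.length ∨ h.getD (h.length - n - 1) 0 ≠ lab) :
    ((((PySem.List.slice h (some (-K)) none).length : Nat) : Int) = K ∧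
      (∀ c ∈ PySem.List.slice h (some (-K)) none,
        c = PySem.List.pyGetD (PySem.List.slice h (some (-K)) none) 0 0))
    ↔ (1 ≤ K ∧ K ≤ (n : Int)) := by
  rcases lt_trichotomy K 0 with hK | hK | hK
  · -- K < 0: slice is a drop from a nonnegative start, length ≥ 0 ≠ K
    rw [PySem.List.slice_from h (by omega : (0:Int) ≤ -K)]
    constructor
    · rintro ⟨hl, -⟩; omega
    · rintro ⟨hl, -⟩; omega
  · -- K = 0: slice is all of h, which is nonempty
    subst hK
    rw [show (-(0:Int)) = ((0:Nat) : Int) by simp, PySem.List.slice_from_natCast]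
    constructor
    · rintro ⟨hl, -⟩
      exfalso
      have hz : h.length = 0 := by simpa using hl
      omega
    · rintro ⟨hl, -⟩; omega
  · -- 1 ≤ K
    have hk0 : 0 < K.toNat := by omega
    have hKk : K = (K.toNat : Int) := by omega
    rw [hKk, PySem.List.slice_from_neg_natCast h K.toNat hk0]
    set k := K.toNat with hkdef
    have hlen2 : (h.drop (h.length - k)).length = h.length - (h.length - k) := by
      simp
    constructor
    · rintro ⟨hl, hall⟩
      have hkle : k ≤ h.length := by
        rw [hlen2] at hl
        omega
      refine ⟨by omega, ?_⟩
      -- show k ≤ n, by contradiction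
      by_contra hkn
      have hnk : n < k := by omega
      have hnlen : n < h.length := by omega
      have hb : h.getD (h.length - n - 1) 0 ≠ lab := by
        rcases hbd with hb | hb
        · omega
        · exact hb
      -- the last element of h is lab
      have hlast : h.getD (h.length - 1) 0 = lab := by
        have hj : (h.length - n) + (n - 1) = h.length - 1 := by omega
        have hg := List.getElem?_drop (xs := h) (i := h.length - n) (j := n - 1)
        rw [hdrop, hj, List.getElem?_replicate] at hg
        rw [List.getD_eq_getElem?_getD, ← hg]
        simp [show n - 1 < n by omega]
      -- both indices lie in the slice
      have hmem1 : h.getD (h.length - 1) 0 ∈ h.drop (h.length - k) := by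
        have hg := List.getElem?_drop (xs := h) (i := h.length - k) (j := k - 1)
        rw [show (h.length - k) + (k - 1) = h.length - 1 by omega] at hg
        have : (h.drop (h.length - k)).getD (k - 1) 0 = h.getD (h.length - 1) 0 := by
          rw [List.getD_eq_getElem?_getD, List.getD_eq_getElem?_getD, hg]
        have hlt : k - 1 < (h.drop (h.length - k)).length := by rw [hlen2]; omega
        rw [← this, List.getD_eq_getElem _ _ hlt]
        exact List.getElem_mem hlt
      have hmem2 : h.getD (h.length - n - 1) 0 ∈ h.drop (h.length - k) := by
        have hg := List.getElem?_drop (xs := h) (i := h.length - k) (j := k - n - 1)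
        rw [show (h.length - k) + (k - n - 1) = h.length - n - 1 by omega] at hg
        have : (h.drop (h.length - k)).getD (k - n - 1) 0 = h.getD (h.length - n - 1) 0 := by
          rw [List.getD_eq_getElem?_getD, List.getD_eq_getElem?_getD, hg]
        have hlt : k - n - 1 < (h.drop (h.length - k)).length := by rw [hlen2]; omega
        rw [← this, List.getD_eq_getElem _ _ hlt]
        exact List.getElem_mem hlt
      have e1 := hall _ hmem1
      have e2 := hall _ hmem2
      rw [hlast] at e1
      rw [← e1] at e2
      exact hb e2
    · rintro ⟨-, hKn⟩
      have hkn : k ≤ n := by omega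
      have hslice : h.drop (h.length - k) = List.replicate k lab := by
        have : h.length - k = (h.length - n) + (n - k) := by omega
        rw [this, ← List.drop_drop, hdrop, List.drop_replicate]
        congr 1
        omega
      rw [hslice]
      constructor
      · rw [List.length_replicate]
      · intro c hc
        have hc' := List.eq_of_mem_replicate hc
        rw [PySem.List.pyGetD_zero]
        rcases k with - | k'
        · omega
        · simp [List.replicate_succ, hc']

-- nested loop over (t, frame) pairs = flat loop over (t, prediction) events
theorem foldl_nested {σ : Type} (f : Int → σ → (Int × Int) → σ)
    (l : List (Int × List (Int × Int))) (init : σ) :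
    l.foldl (fun st tf => tf.2.foldl (f tf.1) st) init
      = (l.flatMap (fun tf => tf.2.map (fun pr => (tf.1, pr)))).foldl
          (fun st e => f e.1 st e.2) init := by
  induction l generalizing init with
  | nil => rfl
  | cons a l ih => simp [List.foldl_append, List.foldl_map, ih]

-- the simulation invariant between A's state and B's state
def InvAB (K : Int)
    (a : PySem.Dict Int Int × PySem.Dict Int Int × PySem.Dict Int (List Int))
    (b : PySem.Dict Int Int × PySem.Dict Int (Int × Int) × PySem.Dict Int Int) : Prop :=
  b.1 = a.1 ∧
  a.1.keys.Nodup ∧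
  a.2.1.keys.Nodup ∧
  b.2.2.items = a.2.1.items.map (fun pc => (pc.1, pc.2 - a.1.getD pc.1 0)) ∧
  (∀ p ∈ a.2.1.keys, a.1.contains p = true) ∧
  (∀ p : Int, b.2.1.get? p = runF (a.2.2.getD p [])) ∧
  (∀ p l c, b.2.1.get? p = some (l, c) → 1 ≤ K → K ≤ c → a.2.1.contains p = true)

theorem InvAB_step (K t : Int) (pr : Int × Int)
    (a : PySem.Dict Int Int × PySem.Dict Int Int × PySem.Dict Int (List Int))
    (b : PySem.Dict Int Int × PySem.Dict Int (Int × Int) × PySem.Dict Int Int)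
    (h : InvAB K a b) :
    InvAB K (ttcStepA K t a pr) (ttcStepB K t b pr) := by
  obtain ⟨fs, ca, ch⟩ := a
  obtain ⟨fs', run, res⟩ := b
  obtain ⟨h1, h2, h3, h4, h5, h6, h7⟩ := h
  replace h1 : fs' = fs := h1
  subst fs' 
  by_cases hx : pr.2 = -1
  · simp only [ttcStepA, ttcStepB, if_pos hx]
    exact ⟨rfl, h2, h3, h4, h5, h6, h7⟩
  · simp only [ttcStepA, ttcStepB, if_neg hx]
    set p := pr.1 with hp
    set x := pr.2 with hxx
    set fs1 := (if fs.contains p = true then fs else fs.insert p t) with hfs1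
    set ch1 := ch.modify p [] (fun l => l ++ [x]) with hch1
    set cnt := (match run.get? p with
      | some lc => if lc.1 = x then lc.2 + 1 else (1:Int)
      | none => (1:Int)) with hcnt
    have hch1p : ch1.getD p [] = ch.getD p [] ++ [x] := by
      rw [hch1]; exact PySem.Dict.getD_modify_self ch p [] _
    have hch1q : ∀ q : Int, q ≠ p → ch1.getD q [] = ch.getD q [] := by
      intro q hq
      rw [hch1]; exact PySem.Dict.getD_modify_of_ne ch [] _ hq
    have hrunnew : runF (ch1.getD p []) = some (x, cnt) := by
      rw [hch1p, runF_append, ← h6 p, hcnt]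
      cases hrp : run.get? p with
      | none => simp [runStep]
      | some lc =>
        by_cases hlx : lc.1 = x
        · simp [runStep, hlx]
        · simp [runStep, hlx]
    have hspec := runOK (ch1.getD p [])
    unfold RunOK at hspec
    rw [hrunnew] at hspec
    obtain ⟨n, hcn, hn1, hnlen, hdropn, hbdn⟩ := hspec
    simp only at hcn hdropn hbdn
    have hcnt1 : (1:Int) ≤ cnt := by rw [hcn]; exact_mod_cast hn1
    have hAiff := sliceCond_iff (ch1.getD p []) x K n hn1 hnlen hdropn hbdn
    rw [← hcn] at hAiff
    have hreskeys : res.keys = ca.keys := by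
      simp only [PySem.Dict.keys]
      rw [h4, List.map_map]
      rfl
    have hrescont : ∀ q : Int, res.contains q = ca.contains q := by
      intro q
      rw [PySem.Dict.contains_eq_decide_mem_keys, PySem.Dict.contains_eq_decide_mem_keys, hreskeys]
    have hfs1getD : ∀ q : Int, q ∈ ca.keys → fs1.getD q 0 = fs.getD q 0 := by
      intro q hq
      rw [hfs1]
      by_cases hfc : fs.contains p = true
      · rw [if_pos hfc]
      · rw [if_neg hfc]
        have hqf : fs.contains q = true := h5 q hq
        have hqp : q ≠ p := fun e => hfc (e ▸ hqf)
        exact PySem.Dict.getD_insert_of_ne fs t 0 hqp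
    have h4' : res.items = ca.items.map (fun pc => (pc.1, pc.2 - fs1.getD pc.1 0)) := by
      rw [h4]
      apply List.map_congr_left
      intro pc hpc
      rw [hfs1getD pc.1 (PySem.Dict.mem_keys_of_mem_items ca hpc)]
    have hfs1nodup : fs1.keys.Nodup := by
      rw [hfs1]; split
      · exact h2
      · exact PySem.Dict.nodup_keys_insert fs p t h2
    have hfs1contp : fs1.contains p = true := by
      rw [hfs1]; split
      · assumption
      · exact PySem.Dict.contains_insert_self fs p t
    have hfs1mono : ∀ q : Int, fs.contains q = true → fs1.contains q = true := by
      intro q hq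
      rw [hfs1]; split
      · exact hq
      · rw [PySem.Dict.contains_insert]; simp [hq]
    have h6' : ∀ q : Int, (run.insert p (x, cnt)).get? q = runF (ch1.getD q []) := by
      intro q
      by_cases hqp : q = p
      · subst hqp; rw [PySem.Dict.get?_insert_self, hrunnew]
      · rw [PySem.Dict.get?_insert_of_ne run (x, cnt) hqp, h6 q, hch1q q hqp]
    by_cases hcap : ca.contains p = true
    · rw [if_neg (fun hco => hco.1 hcap),
        if_neg (fun hco => hco.2 (by rw [hrescont p]; exact hcap))]
      refine ⟨rfl, hfs1nodup, h3, h4', fun q hq => hfs1mono q (h5 q hq), h6', ?_⟩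
      intro q l c hget hK1 hKc
      by_cases hqp : q = p
      · subst hqp; exact hcap
      · rw [PySem.Dict.get?_insert_of_ne run (x, cnt) hqp] at hget
        exact h7 q l c hget hK1 hKc
    · have hresnp : ¬ res.contains p = true := by rw [hrescont p]; exact hcap
      have hKiff : (1 ≤ K ∧ K ≤ cnt) ↔ cnt = K := by
        constructor
        · rintro ⟨hK1, hKc⟩
          by_contra hne
          have hKlt : K < cnt := lt_of_le_of_ne hKc (Ne.symm hne)
          rcases hrp : run.get? p with - | lc
          · rw [hcnt, hrp] at hKlt
            simp at hKlt
            omega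
          · by_cases hlx : lc.1 = x
            · have hval : cnt = lc.2 + 1 := by rw [hcnt, hrp]; simp [hlx]
              have hc2 : ca.contains p = true :=
                h7 p lc.1 lc.2 (by rw [hrp]) hK1 (by omega)
              exact hcap hc2
            · have hval : cnt = 1 := by rw [hcnt, hrp]; simp [hlx]
              omega
        · intro he
          exact ⟨by omega, by omega⟩
      by_cases hck : cnt = K
      · rw [if_pos ⟨hcap, hAiff.mpr (hKiff.mpr hck)⟩, if_pos ⟨hck, hresnp⟩]
        refine ⟨rfl, hfs1nodup, PySem.Dict.nodup_keys_insert ca p t h3, ?_, ?_, h6', ?_⟩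
        · rw [PySem.Dict.items_insert_of_not_contains res _ (by simpa using hresnp),
            PySem.Dict.items_insert_of_not_contains ca t (by simpa using hcap),
            List.map_append, ← h4']
          simp
        · intro q hq
          rcases (PySem.Dict.mem_keys_insert ca p q t).mp hq with hqp | hq'
          · subst hqp; exact hfs1contp
          · exact hfs1mono q (h5 q hq')
        · intro q l c hget hK1 hKc
          by_cases hqp : q = p
          · subst hqp; exact PySem.Dict.contains_insert_self ca p t
          · rw [PySem.Dict.get?_insert_of_ne run (x, cnt) hqp] at hget
            rw [PySem.Dict.contains_insert]
            simp [h7 q l c hget hK1 hKc]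
      · rw [if_neg (fun hco => hck (hKiff.mp (hAiff.mp hco.2))),
          if_neg (fun hco => hck hco.1)]
        refine ⟨rfl, hfs1nodup, h3, h4', fun q hq => hfs1mono q (h5 q hq), h6', ?_⟩
        intro q l c hget hK1 hKc
        by_cases hqp : q = p
        · subst hqp
          rw [PySem.Dict.get?_insert_self] at hget
          have hcc : c = cnt := by
            injection hget with hg
            exact (congrArg Prod.snd hg).symm
          exact absurd (hKiff.mp ⟨hK1, hcc ▸ hKc⟩) hck
        · rw [PySem.Dict.get?_insert_of_ne run (x, cnt) hqp] at hget
          exact h7 q l c hget hK1 hKc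

theorem InvAB_foldl (K : Int) (evs : List (Int × (Int × Int)))
    (a : PySem.Dict Int Int × PySem.Dict Int Int × PySem.Dict Int (List Int))
    (b : PySem.Dict Int Int × PySem.Dict Int (Int × Int) × PySem.Dict Int Int)
    (h : InvAB K a b) :
    InvAB K (evs.foldl (fun st e => ttcStepA K e.1 st e.2) a)
          (evs.foldl (fun st e => ttcStepB K e.1 st e.2) b) := by
  induction evs generalizing a b with
  | nil => exact h
  | cons e evs ih => exact ih _ _ (InvAB_step K e.1 e.2 a b h)

-- ===== VERDICT (by name: the statement is the Claim_ definition above) =====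
theorem time_to_confirm_spec : Claim_equal_time_to_confirm := by
  intro ph K _
  unfold Spec_time_to_confirm time_to_confirm time_to_confirm_alt
  rw [foldl_nested (ttcStepA K), foldl_nested (ttcStepB K)]
  have h0 : InvAB K (PySem.Dict.empty, PySem.Dict.empty, PySem.Dict.empty)
      (PySem.Dict.empty, PySem.Dict.empty, PySem.Dict.empty) := by
    refine ⟨rfl, by simp, by simp, by simp, by simp, fun p => rfl, fun p l c hc => by simp [PySem.Dict.get?_empty] at hc⟩
  have h := InvAB_foldl K
    ((PySem.List.enumerate ph 0).flatMap (fun tf => tf.2.map (fun pr => (tf.1, pr)))) _ _ h0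
  obtain ⟨h1, h2, h3, h4, h5, h6, h7⟩ := h
  set sa := List.foldl (fun st e => ttcStepA K e.1 st e.2)
    (PySem.Dict.empty, PySem.Dict.empty, PySem.Dict.empty)
    ((PySem.List.enumerate ph 0).flatMap (fun tf => tf.2.map (fun pr => (tf.1, pr)))) with hsa
  set sb := List.foldl (fun st e => ttcStepB K e.1 st e.2)
    (PySem.Dict.empty, PySem.Dict.empty, PySem.Dict.empty)
    ((PySem.List.enumerate ph 0).flatMap (fun tf => tf.2.map (fun pr => (tf.1, pr)))) with hsb
  show sa.2.1.keys.map (fun p => (p, sa.2.1.getD p 0 - sa.1.getD p 0)) = sb.2.2.items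
  rw [h4, PySem.Dict.items_eq_map_keys sa.2.1 h3 0, List.map_map]
  rfl
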